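-- pv_equiv track=rewrite | github.com/ScaDS/CoLIBRi | tools/data_generator/gen_technical_drawing_polygons.py | split_points_by_sides
-- ===== SOURCE A (Python) =====
-- def split_points_by_sides(points, sides):
--     '''
--     Separates points into lists by the class given in sides
--     :param points: list of points
--     :param sides: list of classes
--     :return: list of list of points
--     '''
--     side_ids = []
--     split_points = []
--     for point, side_id in zip(points, sides):
--         if side_id in side_ids:
--             split_points[side_ids.index(side_id)].append(list(point))
--         else:
--             split_points.append([list(point)])
--             side_ids.append(side_id)
--     return split_points, side_ids
-- ===== SOURCE B (Python) =====
-- def split_points_by_sides(points, sides):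
--     '''
--     Separates points into lists by the class given in sides
--     :param points: list of points
--     :param sides: list of classes
--     :return: list of list of points
--     '''
--     pairs = list(zip(points, sides))
--     side_ids = list(dict.fromkeys(s for _, s in pairs))
--     split_points = [[list(p) for p, s in pairs if s == sid] for sid in side_ids]
--     return split_points, side_ids
-- ===== Notes on version B (the rewrite author's own statement) =====
-- stated objective: alternative
-- what changed: Replaces A's single incremental grouping loop (membership test + list.index to grow buckets in place) by two staged passes: first compute the distinct side ids in first-appearance order, then build each bucket with an independent filtering pass over the zipped pairs.
import Mathlib
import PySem

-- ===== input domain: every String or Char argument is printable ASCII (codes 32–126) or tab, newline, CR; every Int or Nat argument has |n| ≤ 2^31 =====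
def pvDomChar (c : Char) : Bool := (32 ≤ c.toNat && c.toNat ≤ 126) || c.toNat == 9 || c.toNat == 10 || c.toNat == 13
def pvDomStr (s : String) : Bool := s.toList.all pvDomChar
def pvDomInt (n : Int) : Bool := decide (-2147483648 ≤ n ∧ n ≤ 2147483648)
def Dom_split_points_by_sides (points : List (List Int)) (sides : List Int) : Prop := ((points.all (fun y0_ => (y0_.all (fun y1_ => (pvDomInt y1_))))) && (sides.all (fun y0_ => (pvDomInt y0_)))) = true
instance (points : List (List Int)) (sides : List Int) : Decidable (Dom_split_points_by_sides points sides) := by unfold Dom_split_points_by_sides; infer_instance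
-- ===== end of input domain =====

-- B replaces A's single incremental grouping loop (membership test + list.index into
-- parallel arrays) by two staged passes: ordered dedup of the side ids, then one
-- independent filtering pass per side id to build its bucket (alternative, same cost).


-- ===== PORT A =====
-- one loop step: the body of A's for-loop over (point, side_id), state = (split_points, side_ids)
def pvStepA (st : List (List (List Int)) × List Int) (pv : List Int × Int) :
    List (List (List Int)) × List Int :=
  if pv.2 ∈ st.2 then
    match PySem.List.index? st.2 pv.2 with
    | some i => (st.1.set i (st.1.getD i [] ++ [pv.1]), st.2)
    | none => st        -- unreachable: the membership guard above guarantees index? = some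
  else
    (st.1 ++ [[pv.1]], st.2 ++ [pv.2])

def split_points_by_sides (points : List (List Int)) (sides : List Int) :
    List (List (List Int)) × List Int :=
  (points.zip sides).foldl pvStepA ([], [])

-- ===== PORT B =====
-- pairs = zip(points, sides); side_ids = list(dict.fromkeys(...)) = PySem.List.dedup;
-- the inner comprehension [list(p) for p, s in pairs if s == sid] = filter-then-map.
def split_points_by_sides_alt (points : List (List Int)) (sides : List Int) :
    List (List (List Int)) × List Int :=
  let pairs := points.zip sides
  let side_ids := PySem.List.dedup (pairs.map Prod.snd)
  let split_points := side_ids.map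
    (fun sid => (pairs.filter (fun pv => pv.2 == sid)).map Prod.fst)
  (split_points, side_ids)

-- ===== PRECONDITION & SPEC =====
def Spec_split_points_by_sides (points : List (List Int)) (sides : List Int) (out : List (List (List Int)) × List Int) : Prop := out = split_points_by_sides_alt points sides
instance (points : List (List Int)) (sides : List Int) (out : List (List (List Int)) × List Int) : Decidable (Spec_split_points_by_sides points sides out) := by unfold Spec_split_points_by_sides; infer_instance

-- ===== CLAIM (what is proved, stated in full; the proofs are below) =====
def Claim_equal_split_points_by_sides : Prop := ∀ (points : List (List Int)) (sides : List Int), Dom_split_points_by_sides points sides → Spec_split_points_by_sides points sides (split_points_by_sides points sides)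

-- ===== LEMMAS AND PROOFS =====

-- abbreviations for B's two stages, over an arbitrary pair list
def pvKeys (l : List (List Int × Int)) : List Int := PySem.List.dedup (l.map Prod.snd)
def pvBucket (l : List (List Int × Int)) (k : Int) : List (List Int) :=
  (l.filter (fun pv => pv.2 == k)).map Prod.fst

theorem pvKeys_append (l : List (List Int × Int)) (x : List Int × Int) :
    pvKeys (l ++ [x]) = if x.2 ∈ pvKeys l then pvKeys l else pvKeys l ++ [x.2] := by
  simp only [pvKeys, PySem.List.dedup_eq_ofList, PySem.Set.ofList_eq_foldl, List.map_append,
    List.foldl_append, List.map_cons, List.map_nil, List.foldl_cons, List.foldl_nil]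
  simp [PySem.Set.add, PySem.Set.contains]

theorem pvBucket_append (l : List (List Int × Int)) (x : List Int × Int) (k : Int) :
    pvBucket (l ++ [x]) k = pvBucket l k ++ if x.2 = k then [x.1] else [] := by
  by_cases h : x.2 = k
  · simp [pvBucket, List.filter_append, h]
  · have hb : (x.2 == k) = false := by simp [h]
    simp [pvBucket, List.filter_append, hb, h]

theorem pvBucket_empty_of_not_mem (l : List (List Int × Int)) (k : Int)
    (h : k ∉ pvKeys l) : pvBucket l k = [] := by
  have hm : k ∉ l.map Prod.snd := by
    simpa [pvKeys, PySem.List.mem_dedup] using h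
  simp only [pvBucket, List.map_eq_nil_iff, List.filter_eq_nil_iff]
  intro pv hpv
  simp only [beq_iff_eq]
  exact fun hc => hm (hc ▸ List.mem_map_of_mem hpv)

-- the characterisation of A's fold: state after l = B's staged result on l
theorem pvFoldA_eq (l : List (List Int × Int)) :
    l.foldl pvStepA ([], []) = ((pvKeys l).map (pvBucket l), pvKeys l) := by
  induction l using List.reverseRecOn with
  | nil => simp [pvKeys, PySem.List.dedup]
  | append_singleton l x ih =>
    rw [List.foldl_append, List.foldl_cons, List.foldl_nil, ih]
    have hnd : (pvKeys l).Nodup := by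
      simp [pvKeys, PySem.List.dedup_eq_ofList, PySem.Set.nodup_ofList]
    by_cases hmem : x.2 ∈ pvKeys l
    · -- already-seen side id: A updates bucket i in place, B appends inside the same key
      have hidx : (PySem.List.index? (pvKeys l) x.2).isSome = true :=
        (PySem.List.index?_isSome_iff (pvKeys l) x.2).mpr hmem
      obtain ⟨i, hi⟩ := Option.isSome_iff_exists.mp hidx
      obtain ⟨hk, hki, _⟩ := PySem.List.getElem_of_index?_eq_some hi
      have hkeys : pvKeys (l ++ [x]) = pvKeys l := by rw [pvKeys_append, if_pos hmem]
      have hstep : pvStepA ((pvKeys l).map (pvBucket l), pvKeys l) x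
          = (((pvKeys l).map (pvBucket l)).set i
              ((((pvKeys l).map (pvBucket l)).getD i []) ++ [x.1]), pvKeys l) := by
        unfold pvStepA
        rw [if_pos hmem, hi]
      rw [hstep, hkeys]
      refine Prod.ext ?_ rfl
      have hgetD : ((pvKeys l).map (pvBucket l)).getD i [] = pvBucket l x.2 := by
        rw [← hki]
        simp [List.getD_eq_getElem?_getD, List.getElem?_eq_getElem (by simpa using hk)]
      rw [hgetD]
      apply List.ext_getElem
      · simp
      · intro j hj1 hj2
        have hjk : j < (pvKeys l).length := by simpa using hj2
        simp only [List.getElem_set, List.getElem_map, pvBucket_append]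
        by_cases hij : i = j
        · subst hij
          simp [hki]
        · have hne : x.2 ≠ (pvKeys l)[j] := by
            rw [← hki]
            exact fun hc => hij ((hnd.getElem_inj_iff).mp hc)
          simp [hij, hne]
    · -- new side id: A opens a bucket at the end, B's new key filters to exactly [x.1]
      have hkeys : pvKeys (l ++ [x]) = pvKeys l ++ [x.2] := by
        rw [pvKeys_append, if_neg hmem]
      have hstep : pvStepA ((pvKeys l).map (pvBucket l), pvKeys l)  x
          = ((pvKeys l).map (pvBucket l) ++ [[x.1]], pvKeys l ++ [x.2]) := by
        simp [pvStepA, hmem]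
      rw [hstep, hkeys]
      refine Prod.ext ?_ rfl
      simp only [List.map_append, List.map_cons, List.map_nil]
      congr 1
      · apply List.map_congr_left
        intro k hkmem
        rw [pvBucket_append]
        have : x.2 ≠ k := fun hc => hmem (hc ▸ hkmem)
        simp [this]
      · rw [pvBucket_append, pvBucket_empty_of_not_mem l x.2 hmem]
        simp

-- ===== VERDICT (by name: the statement is the Claim_ definition above) =====
theorem split_points_by_sides_spec : Claim_equal_split_points_by_sides := by
  intro points sides _
  unfold Spec_split_points_by_sides split_points_by_sides split_points_by_sides_alt
  exact pvFoldA_eq (points.zip sides)
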